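-- pv_equiv track=rewrite | github.com/SebasVillota/DABM_Domotica_proyect | main.py | act_des_fun
-- ===== SOURCE A (Python) =====
-- def act_des_fun(state,datos,name):
--     cont =0
--     if('prender' in state or 'prende' in state):
--         for dato in datos:
--             objeto, estado= dato.split(";")
--             estado = estado.strip("\n")
--             estado = estado.strip("\t")
--             if(name == objeto):
--                 datos[cont] = name+";ON\n"
--             cont = cont+1
--     cont = 0
--     if('apagar' in state or 'apaga' in state):
--         for dato in datos:
--             objeto, estado= dato.split(";")
--             estado = estado.strip("\n")
--             estado = estado.strip("\t")
--             if(name == objeto):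
--                 datos[cont] = name+";OFF\n"
--             cont = cont+1
--     return datos
-- ===== SOURCE B (Python) =====
-- def act_des_fun(state, datos, name):
--     # Decide the target state once, keyword precedence as in A ('apaga' overrides),
--     # then a single pass; mutates datos in place just like A.
--     target = None
--     if 'prende' in state:      # 'prender' in state implies 'prende' in state
--         target = 'ON'
--     if 'apaga' in state:       # likewise 'apagar' implies 'apaga'
--         target = 'OFF'
--     if target is None:
--         return datos
--     for i, dato in enumerate(datos):
--         objeto, estado = dato.split(';')
--         if name == objeto:
--             datos[i] = name + ';' + target + '\n'
--     return datos
-- ===== Notes on version B (the rewrite author's own statement) =====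
-- stated objective: simpler
-- what changed: B first resolves the keywords to one target state ('apaga' overriding 'prende', and 'prender'/'apagar' subsumed by their substrings) and then updates the list in a single pass, instead of A's two full passes each re-splitting every entry; no-keyword calls return without scanning.
import Mathlib
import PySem

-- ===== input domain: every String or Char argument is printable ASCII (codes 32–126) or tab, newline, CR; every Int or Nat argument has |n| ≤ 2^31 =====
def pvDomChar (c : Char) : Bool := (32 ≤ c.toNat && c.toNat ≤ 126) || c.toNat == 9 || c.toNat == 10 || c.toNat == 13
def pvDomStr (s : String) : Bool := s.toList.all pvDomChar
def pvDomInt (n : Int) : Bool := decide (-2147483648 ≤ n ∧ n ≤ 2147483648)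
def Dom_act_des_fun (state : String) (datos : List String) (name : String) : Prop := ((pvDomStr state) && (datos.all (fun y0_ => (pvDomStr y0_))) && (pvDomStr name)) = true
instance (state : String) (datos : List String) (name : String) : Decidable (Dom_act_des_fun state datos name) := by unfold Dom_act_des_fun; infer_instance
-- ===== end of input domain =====

-- B resolves the keywords to one target state and updates the list in a single pass
-- (simpler); equivalence is about the return value; both Pythons mutate datos in place identically.


-- ===== PORT A =====
-- first loop of A: sets matching entries to name+";ON\n" (indexed assignment = positional map)
def aLoopOn (name : String) : List String → List String
  | [] => []
  | dato :: rest =>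
    match PySem.Str.split? dato ";" with
    | some [objeto, estado] =>
        let estado := PySem.Str.stripChars estado "\n"
        let _estado := PySem.Str.stripChars estado "\t"
        (if name == objeto then name ++ ";ON\n" else dato) :: aLoopOn name rest
    | _ => dato :: aLoopOn name rest      -- Python raises ValueError here (outside Pre_)

-- second loop of A: same with ";OFF\n"
def aLoopOff (name : String) : List String → List String
  | [] => []
  | dato :: rest =>
    match PySem.Str.split? dato ";" with
    | some [objeto, estado] =>
        let estado := PySem.Str.stripChars estado "\n"
        let _estado := PySem.Str.stripChars estado "\t"
        (if name == objeto then name ++ ";OFF\n" else dato) :: aLoopOff name rest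
    | _ => dato :: aLoopOff name rest     -- Python raises ValueError here (outside Pre_)

def act_des_fun (state : String) (datos : List String) (name : String) : List String :=
  let datos := if PySem.Str.isIn "prender" state || PySem.Str.isIn "prende" state
               then aLoopOn name datos else datos
  let datos := if PySem.Str.isIn "apagar" state || PySem.Str.isIn "apaga" state
               then aLoopOff name datos else datos
  datos

-- ===== PORT B =====
-- the single pass of B, with the already-decided target state
def bLoop (name target : String) : List String → List String
  | [] => []
  | dato :: rest =>
    match PySem.Str.split? dato ";" with
    | some [objeto, _estado] =>
        (if name == objeto then name ++ ";" ++ target ++ "\n" else dato) :: bLoop name target rest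
    | _ => dato :: bLoop name target rest -- Python raises ValueError here (outside Pre_)

def act_des_fun_alt (state : String) (datos : List String) (name : String) : List String :=
  let target : Option String :=
    let t := if PySem.Str.isIn "prende" state then some "ON" else none
    if PySem.Str.isIn "apaga" state then some "OFF" else t
  match target with
  | none => datos
  | some t => bLoop name t datos

-- ===== PRECONDITION & SPEC =====
-- Pre_ excludes exactly the inputs where Python A raises ValueError: a keyword is
-- present and some entry does not contain exactly one ';' (the 2-way unpack fails).
def Pre_act_des_fun (state : String) (datos : List String) (name : String) : Prop :=
  (PySem.Str.isIn "prende" state = true ∨ PySem.Str.isIn "apaga" state = true) →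
    ∀ dato ∈ datos, PySem.Str.count dato ";" = 1
instance (state : String) (datos : List String) (name : String) : Decidable (Pre_act_des_fun state datos name) := by unfold Pre_act_des_fun; infer_instance

def pvWitness_act_des_fun : String × List String × String :=
  ("prender la luz", ["luz;OFF\n", "tv;OFF\n"], "luz")

def Spec_act_des_fun (state : String) (datos : List String) (name : String) (out : List String) : Prop := out = act_des_fun_alt state datos name
instance (state : String) (datos : List String) (name : String) (out : List String) : Decidable (Spec_act_des_fun state datos name out) := by unfold Spec_act_des_fun; infer_instance

-- ===== CLAIM (what is proved, stated in full; the proofs are below) =====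
def Claim_equal_act_des_fun : Prop := ∀ (state : String) (datos : List String) (name : String), Dom_act_des_fun state datos name → Pre_act_des_fun state datos name → Spec_act_des_fun state datos name (act_des_fun state datos name)

-- ===== LEMMAS AND PROOFS =====

-- proof-side model of PySem.Chars.splitOn with a single-character separator
def mySplit (c : Char) : List Char → List Char → List (List Char)
  | [], cur => [cur.reverse]
  | x :: rest, cur => if x = c then cur.reverse :: mySplit c rest [] else mySplit c rest (x :: cur)

theorem splitOn_go_eq (c : Char) (l cur : List Char) (acc : List (List Char)) (fuel : Nat)
    (h : l.length < fuel) :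
    PySem.Chars.splitOn.go [c] fuel l cur acc = acc.reverse ++ mySplit c l cur := by
  induction l generalizing fuel cur acc with
  | nil =>
    cases fuel with
    | zero => omega
    | succ f => simp [PySem.Chars.splitOn.go, mySplit]
  | cons x rest ih =>
    cases fuel with
    | zero => omega
    | succ f =>
      by_cases hc : x = c
      · subst hc
        rw [PySem.Chars.splitOn.go]
        simp only [List.isPrefixOf, BEq.rfl, Bool.true_and, List.isPrefixOf_nil_left, if_true,
          List.length_cons, List.length_nil, List.drop_succ_cons, List.drop_zero]
        rw [ih _ _ _ (by simpa using Nat.lt_of_succ_lt_succ h)]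
        simp [mySplit]
      · rw [PySem.Chars.splitOn.go]
        have : ([c].isPrefixOf (x :: rest)) = false := by
          simp [List.isPrefixOf]; exact fun h' => (hc h'.symm).elim
        simp only [this, if_neg, Bool.false_eq_true, if_false]
        rw [ih _ _ _ (Nat.lt_of_succ_lt_succ h)]
        simp [mySplit, hc]

theorem splitOn_eq_mySplit (c : Char) (l : List Char) :
    PySem.Chars.splitOn l [c] = mySplit c l [] := by
  unfold PySem.Chars.splitOn
  simpa using splitOn_go_eq c l [] [] (l.length + 1) (Nat.lt_succ_self _)

-- the head chunk of mySplit contains no separator (given the accumulator doesn't)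
theorem mySplit_head_not_mem (c : Char) (l : List Char) :
    ∀ cur a rest, c ∉ cur → mySplit c l cur = a :: rest → c ∉ a := by
  induction l with
  | nil =>
    intro cur a rest hcur h
    simp only [mySplit] at h
    cases h; simpa using hcur
  | cons x l ih =>
    intro cur a rest hcur h
    simp only [mySplit] at h
    by_cases hx : x = c
    · rw [if_pos hx] at h
      cases h; simpa using hcur
    · rw [if_neg hx] at h
      exact ih (x :: cur) a rest (by simp [hcur]; exact fun h' => hx h'.symm) h

-- splitting o ++ c :: e where c appears in neither o nor e gives [o, e]
theorem mySplit_append (c : Char) (o : List Char) (ho : c ∉ o) :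
    ∀ cur e, mySplit c (o ++ c :: e) cur = (cur.reverse ++ o) :: mySplit c e [] := by
  induction o with
  | nil => intro cur e; simp [mySplit]
  | cons x o ih =>
    intro cur e
    have hx : x ≠ c := fun h => ho (by simp [h])
    simp only [List.cons_append, mySplit, if_neg hx]
    rw [ih (fun h => ho (by simp [h])) (x :: cur)]
    simp

theorem mySplit_no_sep (c : Char) (e : List Char) (he : c ∉ e) :
    ∀ cur, mySplit c e cur = [cur.reverse ++ e] := by
  induction e with
  | nil => intro cur; simp [mySplit]
  | cons x e ih =>
    intro cur
    have hx : x ≠ c := fun h => he (by simp [h])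
    simp only [mySplit, if_neg hx]
    rw [ih (fun h => he (by simp [h])) (x :: cur)]
    simp

-- the two-pass (ON then OFF) loop of A equals the single OFF pass
theorem aLoopOff_aLoopOn (name : String) (l : List String) :
    aLoopOff name (aLoopOn name l) = aLoopOff name l := by
  induction l with
  | nil => rfl
  | cons dato rest ih =>
    rw [aLoopOn]
    rcases hs : PySem.Str.split? dato ";" with _ | parts
    · simp [PySem.Str.split?, PySem.Chars.split?] at hs
    · match parts, hs with
      | [objeto, estado], hs =>
        simp only
        by_cases hne : name == objeto
        · rw [if_pos hne]
          have hname : name.toList = objeto.toList := by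
            have := eq_of_beq hne; rw [this]
          -- objeto is a chunk of splitOn, so it contains no ';'
          have hsplit : PySem.Chars.splitOn dato.toList [';'] = [objeto.toList, estado.toList] := by
            have h2 := congrArg (Option.map (List.map String.toList)) hs
            rw [PySem.Str.split?_map] at h2
            simpa [PySem.Chars.split?] using h2
          have hnot : (';' : Char) ∉ objeto.toList := by
            apply mySplit_head_not_mem ';' dato.toList [] objeto.toList [estado.toList] (by simp)
            rw [← splitOn_eq_mySplit]; exact hsplit
          have hnotn : (';' : Char) ∉ name.toList := by rw [hname]; exact hnot
          -- split of the rewritten entry name ++ ";ON\n"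
          have hsplit2 : PySem.Str.split? (name ++ ";ON\n") ";" = some [name, "ON\n"] := by
            have hts : (name ++ ";ON\n").toList = name.toList ++ ';' :: "ON\n".toList := by
              simp [String.toList_append]
            have hsep : (";" : String).toList = [';'] := by decide
            simp only [PySem.Str.split?, PySem.Chars.split?, hts, hsep]
            rw [if_neg (by decide), splitOn_eq_mySplit, mySplit_append ';' name.toList hnotn,
              mySplit_no_sep ';' "ON\n".toList (by decide) []]
            simp
          rw [aLoopOff, hsplit2]
          simp only
          rw [aLoopOff, hs]
          simp only [if_pos hne, BEq.rfl, if_true, ih]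
        · rw [if_neg (by simpa using hne)]
          rw [aLoopOff, aLoopOff, hs, ih]
      | o :: e :: x :: r, hs =>
        simp only
        rw [aLoopOff, aLoopOff, hs, ih]
      | [o], hs =>
        simp only
        rw [aLoopOff, aLoopOff, hs, ih]
      | [], hs =>
        simp only
        rw [aLoopOff, aLoopOff, hs, ih]

-- A's passes coincide with B's parametrised pass
theorem aLoopOn_eq_bLoop (name : String) (l : List String) :
    aLoopOn name l = bLoop name "ON" l := by
  induction l with
  | nil => rfl
  | cons dato rest ih =>
    rw [aLoopOn, bLoop]
    rcases hs : PySem.Str.split? dato ";" with _ | (_ | ⟨o, _ | ⟨e, _ | _⟩⟩) <;>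
      simp only [ih] <;> try rfl
    congr 1
    by_cases hne : name == o
    · rw [if_pos hne, if_pos hne]
      have : name ++ ";" ++ "ON" ++ "\n" = name ++ ";ON\n" := by
        apply String.ext; simp [String.toList_append]
      rw [this]
    · rw [if_neg (by simpa using hne), if_neg (by simpa using hne)]

theorem aLoopOff_eq_bLoop (name : String) (l : List String) :
    aLoopOff name l = bLoop name "OFF" l := by
  induction l with
  | nil => rfl
  | cons dato rest ih =>
    rw [aLoopOff, bLoop]
    rcases hs : PySem.Str.split? dato ";" with _ | (_ | ⟨o, _ | ⟨e, _ | _⟩⟩) <;>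
      simp only [ih] <;> try rfl
    congr 1
    by_cases hne : name == o
    · rw [if_pos hne, if_pos hne]
      have : name ++ ";" ++ "OFF" ++ "\n" = name ++ ";OFF\n" := by
        apply String.ext; simp [String.toList_append]
      rw [this]
    · rw [if_neg (by simpa using hne), if_neg (by simpa using hne)]

-- 'prender' in state implies 'prende' in state (substring), and likewise for 'apagar'
theorem isIn_prender_implies (state : String) :
    PySem.Str.isIn "prender" state = true → PySem.Str.isIn "prende" state = true := by
  intro h
  rw [PySem.Str.isIn_iff_infix] at h ⊢
  exact List.IsInfix.trans (by decide) h

theorem isIn_apagar_implies (state : String) :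
    PySem.Str.isIn "apagar" state = true → PySem.Str.isIn "apaga" state = true := by
  intro h
  rw [PySem.Str.isIn_iff_infix] at h ⊢
  exact List.IsInfix.trans (by decide) h

-- ===== VERDICT (by name: the statement is the Claim_ definition above) =====
theorem act_des_fun_spec : Claim_equal_act_des_fun := by
  intro state datos name _hdom _hpre
  unfold Spec_act_des_fun act_des_fun act_des_fun_alt
  have hp : (PySem.Str.isIn "prender" state || PySem.Str.isIn "prende" state)
      = PySem.Str.isIn "prende" state := by
    cases hq : PySem.Str.isIn "prende" state with
    | true => simp [hq]
    | false =>
      cases hr : PySem.Str.isIn "prender" state with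
      | true => rw [isIn_prender_implies state hr] at hq; exact absurd hq (by simp)
      | false => simp
  have ha : (PySem.Str.isIn "apagar" state || PySem.Str.isIn "apaga" state)
      = PySem.Str.isIn "apaga" state := by
    cases hq : PySem.Str.isIn "apaga" state with
    | true => simp [hq]
    | false =>
      cases hr : PySem.Str.isIn "apagar" state with
      | true => rw [isIn_apagar_implies state hr] at hq; exact absurd hq (by simp)
      | false => simp
  rw [hp, ha]
  by_cases hq : PySem.Str.isIn "prende" state = true <;>
    by_cases hr : PySem.Str.isIn "apaga" state = true
  · simp only [if_pos hq, if_pos hr]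
    rw [aLoopOff_aLoopOn]; exact aLoopOff_eq_bLoop name datos
  · simp only [if_pos hq, if_neg hr]
    exact aLoopOn_eq_bLoop name datos
  · simp only [if_neg hq, if_pos hr]
    exact aLoopOff_eq_bLoop name datos
  · simp only [if_neg hq, if_neg hr]
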